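-- pv_equiv track=rewrite | github.com/StepDan23/MADE_algorithms | hw_6/a.py | make_route
-- ===== SOURCE A (Python) =====
-- def first_positive(arr):
--     """ Return first positive or maximum of negative value """
--     max_ind = 0
--     i = 0
--     while i < len(arr):
--         if arr[i] >= 0:
--             return i
--         if arr[i] > arr[max_ind]:
--             max_ind = i
--         i += 1
--     return max_ind
--
-- def make_route(rewards_arr, size):
--     price = 0
--     route = [1]
--     i = 0
--     while i < len(rewards_arr):
--         arr_slice = rewards_arr[i:(i + size)]
--         ind = first_positive(arr_slice)
--         price += arr_slice[ind]
--         i = i + ind + 1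
--         route.append(i + 1)
--     return price, route
-- ===== SOURCE B (Python) =====
-- def make_route(rewards_arr, size):
--     n = len(rewards_arr)
--     # nxt[i] = smallest j >= i with rewards_arr[j] >= 0, or n if there is none
--     nxt = [n] * (n + 1)
--     for k in range(n - 1, -1, -1):
--         nxt[k] = k if rewards_arr[k] >= 0 else nxt[k + 1]
--     price = 0
--     route = [1]
--     i = 0
--     while i < n:
--         end = i + size
--         if end > n:
--             end = n
--         j = nxt[i]
--         if j < end:
--             pick = j            # first nonnegative reward inside the window
--         else:
--             pick = i            # window all negative: leftmost maximum
--             for k in range(i + 1, end):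
--                 if rewards_arr[k] > rewards_arr[pick]:
--                     pick = k
--         price += rewards_arr[pick]
--         i = pick + 1
--         route.append(i + 1)
--     return price, route
-- ===== Notes on version B (the rewrite author's own statement) =====
-- stated objective: faster
-- what changed: B precomputes a next-nonnegative-index table once, so each window containing a nonnegative reward is resolved in O(1) without building or scanning a slice; only all-negative windows are scanned in place for their leftmost maximum.
import Mathlib
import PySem

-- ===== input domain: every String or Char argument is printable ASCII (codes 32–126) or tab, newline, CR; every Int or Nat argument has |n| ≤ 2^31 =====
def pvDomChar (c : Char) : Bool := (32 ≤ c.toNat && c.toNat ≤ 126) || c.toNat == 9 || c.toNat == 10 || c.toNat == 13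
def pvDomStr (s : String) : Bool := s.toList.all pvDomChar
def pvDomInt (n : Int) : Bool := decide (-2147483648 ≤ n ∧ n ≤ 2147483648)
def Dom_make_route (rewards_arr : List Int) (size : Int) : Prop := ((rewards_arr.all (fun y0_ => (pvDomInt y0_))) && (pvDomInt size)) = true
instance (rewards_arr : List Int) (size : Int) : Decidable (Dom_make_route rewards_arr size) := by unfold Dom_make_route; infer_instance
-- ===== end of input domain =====

-- B replaces A's per-window slice + first_positive scan by a precomputed next-nonnegative
-- index (O(1) pick for windows containing a nonnegative reward) and an in-place leftmost-max
-- scan only for all-negative windows; same return value on the stated precondition.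

-- ===== PORT A =====
-- first_positive's while loop; the fuel argument only makes the recursion structural
-- (fuel = arr.length always suffices: i increases by 1 each step and the fuel-0 value
-- equals the loop-exit value). Loop guard keeps every index in range, so List.getD is exact.
def fpGo (arr : List Int) : Nat → Nat → Nat → Nat
  | 0, _, max_ind => max_ind
  | fuel+1, i, max_ind =>
    if i < arr.length then
      if 0 ≤ arr.getD i 0 then i
      else if arr.getD i 0 > arr.getD max_ind 0 then fpGo arr fuel (i+1) i
      else fpGo arr fuel (i+1) max_ind
    else max_ind

def first_positive (arr : List Int) : Nat := fpGo arr arr.length 0 0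

-- make_route's while loop; arr_slice[ind] via pyGet? (none = Python's IndexError, which
-- Pre_make_route excludes). Fuel = arr.length suffices: i increases by ≥ 1 per iteration.
def mrGo (arr : List Int) (size : Int) : Nat → Nat → Int → List Int → Int × List Int
  | 0, _, price, route => (price, route)
  | fuel+1, i, price, route =>
    if i < arr.length then
      let w := PySem.List.slice arr (some (i : Int)) (some ((i : Int) + size))
      let ind := first_positive w
      match PySem.List.pyGet? w (ind : Int) with
      | none => (price, route)   -- Python raises IndexError here; excluded by Pre_make_route
      | some v => mrGo arr size fuel (i + ind + 1) (price + v) (route ++ [(i : Int) + (ind : Int) + 2])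
    else (price, route)

def make_route (rewards_arr : List Int) (size : Int) : Int × List Int :=
  mrGo rewards_arr size rewards_arr.length 0 0 [1]

-- ===== PORT B =====
-- B's Python fills the table nxt[] right-to-left with the recurrence
-- nxt[i] = (i if arr[i] >= 0 else nxt[i+1]), nxt[n] = n; ported as that recurrence
-- (fuel makes it structural; fuel = arr.length always suffices).
def nxtGo (arr : List Int) : Nat → Nat → Nat
  | 0, _ => arr.length
  | fuel+1, i =>
    if i < arr.length then
      (if 0 ≤ arr.getD i 0 then i else nxtGo arr fuel (i+1))
    else arr.length

-- the 'for k in range(i+1, end)' leftmost-max scan of B's all-negative branch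
def argmaxGo (arr : List Int) : Nat → Nat → Nat → Nat → Nat
  | 0, _, _, m => m
  | fuel+1, k, stop, m =>
    if k < stop then
      if arr.getD k 0 > arr.getD m 0 then argmaxGo arr fuel (k+1) stop k
      else argmaxGo arr fuel (k+1) stop m
    else m

-- the body of B's while loop up to the pick of the rewarded index
def pickB (arr : List Int) (size : Int) (i : Nat) : Nat :=
  let endI : Int := if (i : Int) + size > (arr.length : Int) then (arr.length : Int) else (i : Int) + size
  let j := nxtGo arr arr.length i
  if (j : Int) < endI then j
  else argmaxGo arr endI.toNat (i+1) endI.toNat i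

def mrAltGo (arr : List Int) (size : Int) : Nat → Nat → Int → List Int → Int × List Int
  | 0, _, price, route => (price, route)
  | fuel+1, i, price, route =>
    if i < arr.length then
      let pick := pickB arr size i
      mrAltGo arr size fuel (pick + 1) (price + arr.getD pick 0) (route ++ [(pick : Int) + 2])
    else (price, route)

def make_route_alt (rewards_arr : List Int) (size : Int) : Int × List Int :=
  mrAltGo rewards_arr size rewards_arr.length 0 0 [1]

-- ===== PRECONDITION & SPEC =====
-- On a nonempty list with size ≤ 0, A always eventually takes an empty slice and raises
-- IndexError; Pre_ excludes exactly those inputs (A returns on every other input).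
def Pre_make_route (rewards_arr : List Int) (size : Int) : Prop :=
  rewards_arr = [] ∨ 1 ≤ size
instance (rewards_arr : List Int) (size : Int) : Decidable (Pre_make_route rewards_arr size) := by
  unfold Pre_make_route; infer_instance

def pvWitness_make_route : List Int × Int := ([1, -2, 3, -4], 2)

def Spec_make_route (rewards_arr : List Int) (size : Int) (out : Int × List Int) : Prop := out = make_route_alt rewards_arr size
instance (rewards_arr : List Int) (size : Int) (out : Int × List Int) : Decidable (Spec_make_route rewards_arr size out) := by unfold Spec_make_route; infer_instance

-- ===== CLAIM (what is proved, stated in full; the proofs are below) =====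
def Claim_equal_make_route : Prop := ∀ (rewards_arr : List Int) (size : Int), Dom_make_route rewards_arr size → Pre_make_route rewards_arr size → Spec_make_route rewards_arr size (make_route rewards_arr size)

-- ===== LEMMAS AND PROOFS =====

-- nxtGo never moves left (given i ≤ length, which all reachable calls satisfy)
theorem nxtGo_ge (arr : List Int) : ∀ (f i : Nat), i ≤ arr.length → i ≤ nxtGo arr f i := by
  intro f
  induction f with
  | zero => intro i h; simpa [nxtGo] using h
  | succ f ih =>
    intro i h
    by_cases hi : i < arr.length
    · simp only [nxtGo, if_pos hi]
      split
      · exact le_refl i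
      · exact le_trans (Nat.le_succ i) (ih (i+1) hi)
    · simp [nxtGo, hi]; omega

-- if everything in [lo, e) is negative, nxtGo from lo lands at or beyond e
theorem nxtGo_ge_of_allneg (arr : List Int) (e : Nat) (he : e ≤ arr.length) :
    ∀ (g lo f : Nat), lo ≤ arr.length → e - lo ≤ g → arr.length - lo ≤ f →
    (∀ q, lo ≤ q → q < e → arr.getD q 0 < 0) → e ≤ nxtGo arr f lo := by
  intro g
  induction g with
  | zero =>
    intro lo f hle hg _ _
    have hlo : e ≤ lo := by omega
    exact le_trans hlo (nxtGo_ge arr f lo hle)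
  | succ g ih =>
    intro lo f hle hg hf hneg
    by_cases hlo : e ≤ lo
    · exact le_trans hlo (nxtGo_ge arr f lo hle)
    · have hlt : lo < arr.length := by omega
      have hf1 : 1 ≤ f := by omega
      obtain ⟨f', rfl⟩ : ∃ f', f = f' + 1 := ⟨f - 1, by omega⟩
      have hvn : arr.getD lo 0 < 0 := hneg lo (le_refl lo) (by omega)
      simp only [nxtGo, if_pos hlt, if_neg (by omega : ¬ (0:Int) ≤ arr.getD lo 0)]
      exact ih (lo+1) f' (by omega) (by omega) (by omega)
        (fun q hq hq' => hneg q (by omega) hq')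

-- fpGo's result stays below the length (given the running max index is)
theorem fpGo_lt (w : List Int) : ∀ (f p max_ind : Nat), max_ind < w.length →
    fpGo w f p max_ind < w.length := by
  intro f
  induction f with
  | zero => intro p m hm; simpa [fpGo] using hm
  | succ f ih =>
    intro p m hm
    by_cases hp : p < w.length
    · simp only [fpGo, if_pos hp]
      split
      · exact hp
      · split
        · exact ih (p+1) p hp
        · exact ih (p+1) m hm
    · simpa [fpGo, hp] using hm

-- when a nonnegative element exists at or after p, A's window scan finds exactly the
-- index B's next-nonnegative recurrence finds (shifted by the window offset i)
theorem fp_nxt (arr w : List Int) (i e : Nat)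
    (hw : w.length = e - i) (he : e ≤ arr.length)
    (hbr : ∀ k, k < e - i → w.getD k 0 = arr.getD (i+k) 0) :
    ∀ (fw p max_ind fn : Nat), w.length - p ≤ fw → arr.length - (i+p) ≤ fn →
    (∃ q, p ≤ q ∧ q < w.length ∧ 0 ≤ w.getD q 0) →
    i + fpGo w fw p max_ind = nxtGo arr fn (i+p) := by
  intro fw
  induction fw with
  | zero =>
    intro p m fn hfw _ hex
    obtain ⟨q, hq1, hq2, _⟩ := hex; omega
  | succ fw ih =>
    intro p m fn hfw hfn hex
    obtain ⟨q, hq1, hq2, hq3⟩ := hex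
    have hp : p < w.length := by omega
    have hip : i + p < arr.length := by omega
    obtain ⟨fn', rfl⟩ : ∃ f', fn = f' + 1 := ⟨fn - 1, by omega⟩
    simp only [fpGo, nxtGo, if_pos hp, if_pos hip]
    have hb : w.getD p 0 = arr.getD (i+p) 0 := hbr p (by omega)
    by_cases hpos : 0 ≤ w.getD p 0
    · rw [if_pos hpos, if_pos (show (0:Int) ≤ arr.getD (i+p) 0 by omega)]
    · rw [if_neg hpos, if_neg (show ¬ (0:Int) ≤ arr.getD (i+p) 0 by omega)]
      have hq1' : p + 1 ≤ q := by
        rcases Nat.lt_or_ge p q with h | h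
        · omega
        · exfalso; have : p = q := by omega
          exact hpos (this ▸ hq3)
      have hex' : ∃ q', p + 1 ≤ q' ∧ q' < w.length ∧ 0 ≤ w.getD q' 0 := ⟨q, hq1', hq2, hq3⟩
      have harith : i + (p + 1) = i + p + 1 := by omega
      split
      · rw [ih (p+1) p fn' (by omega) (by omega) hex', harith]
      · rw [ih (p+1) m fn' (by omega) (by omega) hex', harith]

-- when the whole window is negative, A's scan computes exactly B's leftmost-max scan
theorem fp_argmax (arr w : List Int) (i e : Nat)
    (hw : w.length = e - i) (_he : e ≤ arr.length)
    (hbr : ∀ k, k < e - i → w.getD k 0 = arr.getD (i+k) 0)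
    (hneg : ∀ k, k < w.length → w.getD k 0 < 0) :
    ∀ (fw p max_ind fa : Nat), w.length - p ≤ fw → e - (i+p) ≤ fa → max_ind < w.length →
    i + fpGo w fw p max_ind = argmaxGo arr fa (i+p) e (i+max_ind) := by
  intro fw
  induction fw with
  | zero =>
    intro p m fa hfw _ hm
    have hpe : ¬ (i + p < e) := by omega
    cases fa <;> simp [fpGo, argmaxGo, hpe]
  | succ fw ih =>
    intro p m fa hfw hfa hm
    by_cases hp : p < w.length
    · have hip : i + p < e := by omega
      obtain ⟨fa', rfl⟩ : ∃ f', fa = f' + 1 := ⟨fa - 1, by omega⟩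
      have hbp : w.getD p 0 = arr.getD (i+p) 0 := hbr p (by omega)
      have hbm : w.getD m 0 = arr.getD (i+m) 0 := hbr m (by omega)
      simp only [fpGo, argmaxGo, if_pos hp, if_pos hip,
        if_neg (by have := hneg p hp; omega : ¬ (0:Int) ≤ w.getD p 0)]
      have harith : i + (p + 1) = i + p + 1 := by omega
      by_cases hcmp : w.getD p 0 > w.getD m 0
      · rw [if_pos hcmp, if_pos (by omega : arr.getD (i+p) 0 > arr.getD (i+m) 0)]
        rw [ih (p+1) p fa' (by omega) (by omega) hp, harith]
      · rw [if_neg hcmp, if_neg (by omega : ¬ arr.getD (i+p) 0 > arr.getD (i+m) 0)]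
        rw [ih (p+1) m fa' (by omega) (by omega) hm, harith]
    · have hpe : ¬ (i + p < e) := by omega
      cases fa <;> simp [fpGo, argmaxGo, hp, hpe]

-- one iteration of A's loop picks the same index (and hence reward) as B's pickB
theorem step_pick (arr : List Int) (size : Int) (i : Nat)
    (hs : 1 ≤ size) (hi : i < arr.length) :
    i + first_positive (PySem.List.slice arr (some (i : Int)) (some ((i : Int) + size))) = pickB arr size i ∧
    PySem.List.pyGet? (PySem.List.slice arr (some (i : Int)) (some ((i : Int) + size)))
      ((first_positive (PySem.List.slice arr (some (i : Int)) (some ((i : Int) + size))) : Nat) : Int)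
      = some (arr.getD (pickB arr size i) 0) := by
  set w := PySem.List.slice arr (some (i : Int)) (some ((i : Int) + size)) with hwdef
  set e := min ((i : Int) + size).toNat arr.length with hedef
  have h0i : (0:Int) ≤ (i : Int) := Int.natCast_nonneg i
  have h0s : (0:Int) ≤ (i : Int) + size := by omega
  have hXe : (((i : Int) + size).toNat : Int) = (i : Int) + size := Int.toNat_of_nonneg h0s
  have hw : w = (arr.drop i).take (((i : Int) + size).toNat - i) := by
    rw [hwdef, PySem.List.slice_toNat _ h0i h0s, Int.toNat_natCast]
  have hXi : i + 1 ≤ ((i : Int) + size).toNat := by omega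
  have he : e ≤ arr.length := by omega
  have hie : i < e := by omega
  have wlen : w.length = e - i := by
    rw [hw]; simp [List.length_take, List.length_drop]; omega
  have hbr : ∀ k, k < e - i → w.getD k 0 = arr.getD (i+k) 0 := by
    intro k hk
    rw [hw, List.getD_eq_getElem?_getD, List.getD_eq_getElem?_getD,
      List.getElem?_take_of_lt (by omega), List.getElem?_drop]
  have hwpos : 0 < w.length := by omega
  -- the clamped window end computed by pickB is exactly e
  have hendI : (if (i : Int) + size > (arr.length : Int) then (arr.length : Int) else (i : Int) + size) = (e : Int) := by
    split <;> omega
  have hpickB : pickB arr size i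
      = (if ((nxtGo arr arr.length i : Nat) : Int) < (e : Int) then nxtGo arr arr.length i
         else argmaxGo arr e (i+1) e i) := by
    unfold pickB
    rw [hendI]
    simp [Int.toNat_natCast]
  have hfp : first_positive w = fpGo w w.length 0 0 := rfl
  by_cases hex : ∃ q, q < w.length ∧ 0 ≤ w.getD q 0
  · -- the window contains a nonnegative reward
    obtain ⟨q, hq1, hq2⟩ := hex
    have h1 : i + fpGo w w.length 0 0 = nxtGo arr arr.length (i + 0) :=
      fp_nxt arr w i e wlen he hbr w.length 0 0 arr.length (by omega) (by omega)
        ⟨q, Nat.zero_le q, hq1, hq2⟩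
    rw [Nat.add_zero] at h1
    have hlt : fpGo w w.length 0 0 < w.length := fpGo_lt w w.length 0 0 hwpos
    have hjlt : nxtGo arr arr.length i < e := by omega
    have hpick : pickB arr size i = nxtGo arr arr.length i := by
      rw [hpickB, if_pos (by exact_mod_cast hjlt)]
    constructor
    · rw [hfp, hpick, h1]
    · rw [hfp, hpick, PySem.List.pyGet?_natCast, List.getElem?_eq_getElem hlt]
      have : w[fpGo w w.length 0 0] = w.getD (fpGo w w.length 0 0) 0 := by
        rw [List.getD_eq_getElem?_getD, List.getElem?_eq_getElem hlt]; rfl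
      rw [this, hbr _ (by omega), h1]
  · -- the window is all-negative
    push Not at hex
    have hneg : ∀ k, k < w.length → w.getD k 0 < 0 := by
      intro k hk; have := hex k hk; omega
    have hnegarr : ∀ q, i ≤ q → q < e → arr.getD q 0 < 0 := by
      intro q hq1 hq2
      have := hneg (q - i) (by omega)
      rw [hbr _ (by omega)] at this
      have harith : i + (q - i) = q := by omega
      rwa [harith] at this
    have hjge : e ≤ nxtGo arr arr.length i :=
      nxtGo_ge_of_allneg arr e he e i arr.length (by omega) (by omega) (by omega) hnegarr
    have hpick : pickB arr size i = argmaxGo arr e (i+1) e i := by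
      rw [hpickB, if_neg (by exact_mod_cast not_lt.mpr hjge)]
    obtain ⟨fw', hfw⟩ : ∃ f', w.length = f' + 1 := ⟨w.length - 1, by omega⟩
    have hstep : fpGo w w.length 0 0 = fpGo w fw' 1 0 := by
      rw [hfw]
      simp only [fpGo, if_pos (show 0 < w.length by omega),
        if_neg (show ¬ (0:Int) ≤ w.getD 0 0 by have := hneg 0 hwpos; omega),
        if_neg (show ¬ w.getD 0 0 > w.getD 0 0 by omega)]
    have h1 : i + fpGo w fw' 1 0 = argmaxGo arr e (i+1) e (i+0) :=
      fp_argmax arr w i e wlen he hbr hneg fw' 1 0 e (by omega) (by omega) hwpos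
    simp only [Nat.add_zero] at h1
    have hlt : fpGo w w.length 0 0 < w.length := fpGo_lt w w.length 0 0 hwpos
    constructor
    · rw [hfp, hpick, hstep, h1]
    · rw [hfp, hpick, PySem.List.pyGet?_natCast, List.getElem?_eq_getElem hlt]
      have : w[fpGo w w.length 0 0] = w.getD (fpGo w w.length 0 0) 0 := by
        rw [List.getD_eq_getElem?_getD, List.getElem?_eq_getElem hlt]; rfl
      rw [this, hbr _ (by omega), hstep, h1]

-- the two loops agree step by step (same fuel, same state)
theorem mr_eq_go (arr : List Int) (size : Int) (hs : 1 ≤ size) :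
    ∀ (fuel i : Nat) (price : Int) (route : List Int),
    mrGo arr size fuel i price route = mrAltGo arr size fuel i price route := by
  intro fuel
  induction fuel with
  | zero => intro i price route; rfl
  | succ fuel ih =>
    intro i price route
    by_cases hi : i < arr.length
    · obtain ⟨hpick, hget⟩ := step_pick arr size i hs hi
      simp only [mrGo, mrAltGo, if_pos hi, hget]
      have h1 : i + first_positive (PySem.List.slice arr (some (i : Int)) (some ((i : Int) + size))) + 1
          = pickB arr size i + 1 := by omega
      have h2 : (i : Int) + ((first_positive (PySem.List.slice arr (some (i : Int)) (some ((i : Int) + size))) : Nat) : Int) + 2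
          = ((pickB arr size i : Nat) : Int) + 2 := by
        have := hpick; push_cast [← this]; ring
      rw [h1, h2, ih]
    · simp [mrGo, mrAltGo, hi]

-- ===== VERDICT (by name: the statement is the Claim_ definition above) =====
theorem make_route_spec : Claim_equal_make_route := by
  intro arr size _ hpre
  unfold Spec_make_route make_route make_route_alt
  rcases hpre with h | h
  · subst h; rfl
  · exact mr_eq_go arr size h arr.length 0 0 [1]
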